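-- pv_equiv track=rewrite | github.com/Alesh/moexsrc | src/moexsrc/resolver.py | resolve_desc
-- ===== SOURCE A (Python) =====
-- import typing as t
--
-- ALIASES = {
--     ("stock", "shares", "TQBR"): ["eq", "stock", "shares"],
--     ("currency", "selt", "CETS"): ["fx", "currency", "selt", "forex"],
--     ("futures", "forts", "RFUD"): ["fo", "futures", "forts"],
-- }
--
-- def resolve_desc(engine: str, market: str, boardid: str) -> dict[str, t.Any]:
--     candidate = None
--     for engine_, market_, boardid_ in ALIASES.keys():
--         if engine == engine and market_ == market:
--             candidate = dict(engine=engine_, market=market_, boardid=boardid_)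
--             if boardid == boardid_:
--                 return candidate
--     if candidate is not None:
--         return candidate
--     raise ValueError(f"Unrecognized market path: {market}")
-- ===== SOURCE B (Python) =====
-- ALIASES = {
--     ("stock", "shares", "TQBR"): ["eq", "stock", "shares"],
--     ("currency", "selt", "CETS"): ["fx", "currency", "selt", "forex"],
--     ("futures", "forts", "RFUD"): ["fo", "futures", "forts"],
-- }
--
-- # Reverse index built once: market -> template dict (A's engine check is always
-- # true and its boardid branch never changes the returned value, so only the
-- # market determines the result).
-- _BY_MARKET = {m: {"engine": e, "market": m, "boardid": b} for (e, m, b) in ALIASES}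
--
-- def resolve_desc(engine: str, market: str, boardid: str) -> dict:
--     try:
--         return dict(_BY_MARKET[market])
--     except KeyError:
--         raise ValueError(f"Unrecognized market path: {market}")
-- ===== Notes on version B (the rewrite author's own statement) =====
-- stated objective: simpler
-- what changed: Replaces the linear scan over ALIASES keys (always-true engine check, candidate accumulator, early-return boardid branch) with a reverse index built once from market to the result dict, consulted by a single lookup; Pre_ excludes the markets on which A raises ValueError (B raises the same ValueError there).
import Mathlib
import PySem

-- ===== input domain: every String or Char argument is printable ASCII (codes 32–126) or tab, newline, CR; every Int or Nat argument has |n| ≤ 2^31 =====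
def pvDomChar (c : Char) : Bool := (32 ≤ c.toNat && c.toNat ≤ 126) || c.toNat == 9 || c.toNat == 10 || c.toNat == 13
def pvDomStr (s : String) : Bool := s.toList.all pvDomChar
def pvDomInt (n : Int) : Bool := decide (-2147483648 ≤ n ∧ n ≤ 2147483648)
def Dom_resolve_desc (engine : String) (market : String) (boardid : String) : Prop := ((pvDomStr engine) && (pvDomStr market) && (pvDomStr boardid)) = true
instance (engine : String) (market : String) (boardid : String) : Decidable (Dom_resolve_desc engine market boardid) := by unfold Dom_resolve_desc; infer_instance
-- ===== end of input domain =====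

-- B replaces A's linear scan (always-true engine check, candidate accumulator, early-return
-- boardid branch) with a reverse index from market to the result dict, consulted by one lookup.

-- ===== PORT A =====
-- the keys of ALIASES, in insertion order
def aliasKeys : List (String × String × String) :=
  [("stock", "shares", "TQBR"), ("currency", "selt", "CETS"), ("futures", "forts", "RFUD")]

-- A's loop: candidate accumulator, early return when boardid matches; the raise is outside Pre_ ([]).
def resolveLoop (engine : String) (market : String) (boardid : String) :
    List (String × String × String) → Option (List (String × String)) → List (String × String)
  | [], cand => cand.getD []   -- loop ended: return candidate, or raise (excluded by Pre_) → []
  | (e, m, b) :: rest, cand =>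
    if engine == engine && m == market then
      let c := [("engine", e), ("market", m), ("boardid", b)]
      if boardid == b then c else resolveLoop engine market boardid rest (some c)
    else resolveLoop engine market boardid rest cand

def resolve_desc (engine : String) (market : String) (boardid : String) : List (String × String) :=
  resolveLoop engine market boardid aliasKeys none

-- ===== PORT B =====
-- reverse index built once: market → result dict
def byMarket : PySem.Dict String (List (String × String)) :=
  PySem.Dict.ofList [("shares",  [("engine", "stock"),    ("market", "shares"), ("boardid", "TQBR")]),
   ("selt",    [("engine", "currency"), ("market", "selt"),   ("boardid", "CETS")]),
   ("forts",   [("engine", "futures"),  ("market", "forts"),  ("boardid", "RFUD")])]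

def resolve_desc_alt (engine : String) (market : String) (boardid : String) : List (String × String) :=
  match PySem.Dict.get? byMarket market with
  | some d => d
  | none => []   -- KeyError → ValueError (excluded by Pre_)

-- ===== PRECONDITION & SPEC =====
-- Pre_ excludes exactly the inputs on which A raises ValueError (market not in the alias table).
def Pre_resolve_desc (engine : String) (market : String) (boardid : String) : Prop :=
  market = "shares" ∨ market = "selt" ∨ market = "forts"
instance (engine : String) (market : String) (boardid : String) : Decidable (Pre_resolve_desc engine market boardid) := by unfold Pre_resolve_desc; infer_instance
def pvWitness_resolve_desc : String × String × String := ("stock", "shares", "TQBR")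

def Spec_resolve_desc (engine : String) (market : String) (boardid : String) (out : List (String × String)) : Prop := out = resolve_desc_alt engine market boardid
instance (engine : String) (market : String) (boardid : String) (out : List (String × String)) : Decidable (Spec_resolve_desc engine market boardid out) := by unfold Spec_resolve_desc; infer_instance

-- ===== CLAIM (what is proved, stated in full; the proofs are below) =====
def Claim_equal_resolve_desc : Prop := ∀ (engine : String) (market : String) (boardid : String), Dom_resolve_desc engine market boardid → Pre_resolve_desc engine market boardid → Spec_resolve_desc engine market boardid (resolve_desc engine market boardid)

-- ===== LEMMAS AND PROOFS =====

-- ===== VERDICT (by name: the statement is the Claim_ definition above) =====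
theorem resolve_desc_spec : Claim_equal_resolve_desc := by
  intro engine market boardid _ hpre
  unfold Spec_resolve_desc resolve_desc resolve_desc_alt
  rcases hpre with h | h | h <;> subst h <;>
    simp only [resolveLoop, aliasKeys, beq_self_eq_true, Bool.true_and] <;>
    norm_num [resolveLoop] <;> split_ifs <;> simp_all <;> rfl
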